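-- pv_equiv track=rewrite | github.com/ThuyLinh110/Mobile | NguyenThuyLinh/PYTHON/Chiahet45.py | ChiaHet
-- ===== SOURCE A (Python) =====
-- def TongChuSo(n):
--     sum=0
--     for i in n:
--         sum+=int(i)
--     return sum
--
-- def ChiaHet(n):
--     st1=""
--     if TongChuSo(n)%9==0:
--         if ("5" in n) or ("0" in n):
--             st="".join(sorted(n, reverse=True))
--             if ("5" in n) and ("0" not in n) :
--                 index5 = st.find("5")
--                 for i in range(index5):
--                     st1+=st[i]
--                 for i in range(index5,len(st)-1):
--                     st1+=st[i+1]
--                 st1+="5"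
--                 return st1
--             return st
--
--     return st1
-- ===== SOURCE B (Python) =====
-- def ChiaHet(n):
--     total = 0
--     cnt = [0] * 10
--     for c in n:
--         d = int(c)
--         total += d
--         cnt[d] += 1
--     if total % 9 != 0 or (cnt[0] == 0 and cnt[5] == 0):
--         return ""
--     if cnt[0] > 0:
--         return "".join(str(d) * cnt[d] for d in range(9, -1, -1))
--     pieces = [str(d) * (cnt[d] - (1 if d == 5 else 0)) for d in range(9, -1, -1)]
--     return "".join(pieces) + "5"
-- ===== Notes on version B (the rewrite author's own statement) =====
-- stated objective: alternative
-- what changed: Replaces reverse-sort plus find/slice surgery for relocating a '5' with a counting construction: one pass builds digit counts, then the answer is emitted as digits 9..0 repeated by count, with one '5' withheld and appended at the end when there is a '5' but no '0'.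
import Mathlib
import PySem

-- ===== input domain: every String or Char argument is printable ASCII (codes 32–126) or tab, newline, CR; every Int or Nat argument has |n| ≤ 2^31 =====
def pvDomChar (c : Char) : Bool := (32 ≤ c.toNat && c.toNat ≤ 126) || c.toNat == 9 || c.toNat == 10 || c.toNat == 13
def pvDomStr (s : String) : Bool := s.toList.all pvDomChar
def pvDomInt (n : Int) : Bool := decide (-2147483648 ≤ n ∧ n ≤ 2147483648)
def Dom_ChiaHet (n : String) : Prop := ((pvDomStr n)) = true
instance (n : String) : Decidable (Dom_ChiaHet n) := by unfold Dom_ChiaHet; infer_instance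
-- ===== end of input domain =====

-- B replaces A's reverse sort plus find/slice surgery by a one-pass digit-count array and a
-- direct 9-down-to-0 counting construction (the spare '5' folded into the construction).

-- ===== PORT A =====
-- helper TongChuSo: sum of int(i) over the characters; none = ValueError from int()
def TongChuSo (n : List Char) : Option Int :=
  n.foldl (fun acc c =>
    match acc, PySem.Int.ofChars? [c] with
    | some s, some v => some (s + v)
    | _, _ => none) (some 0)

def ChiaHet (n : String) : String :=
  let cs := n.toList
  match TongChuSo cs with
  | none => ""   -- int() raised ValueError; these inputs are excluded by Pre_ChiaHet
  | some s =>
    if PySem.Int.mod s 9 = 0 then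
      if PySem.Chars.isIn ['5'] cs || PySem.Chars.isIn ['0'] cs then
        let st := PySem.List.sorted cs (fun c => c) true
        if PySem.Chars.isIn ['5'] cs && !(PySem.Chars.isIn ['0'] cs) then
          let i5 := PySem.Chars.find st ['5']
          let st1 := (PySem.List.pyRange 0 i5).foldl
            (fun acc i => acc ++ [PySem.List.pyGetD st i ' ']) []
          let st2 := (PySem.List.pyRange i5 ((st.length : Int) - 1)).foldl
            (fun acc i => acc ++ [PySem.List.pyGetD st (i + 1) ' ']) st1
          String.ofList (st2 ++ ['5'])
        else String.ofList st
      else ""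
    else ""

-- ===== PORT B =====
-- "".join of the pieces is ported as List.flatten (concatenation of the pieces, exact)
def ChiaHet_alt (n : String) : String :=
  match n.toList.foldl (fun acc c =>
      match acc, PySem.Int.ofChars? [c] with
      | some (t, cnt), some d => some (t + d, cnt.set d.toNat (cnt.getD d.toNat 0 + 1))
      | _, _ => none) (some ((0 : Int), List.replicate 10 (0 : Nat))) with
  | none => ""   -- int() raised ValueError
  | some (total, cnt) =>
    if PySem.Int.mod total 9 ≠ 0 ∨ (cnt.getD 0 0 = 0 ∧ cnt.getD 5 0 = 0) then ""
    else if 0 < cnt.getD 0 0 then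
      String.ofList
        (((PySem.List.pyRange 9 (-1) (-1)).map
          (fun d => (List.replicate (cnt.getD d.toNat 0) (PySem.Int.toChars d)).flatten)).flatten)
    else
      String.ofList
        ((((PySem.List.pyRange 9 (-1) (-1)).map
          (fun d => (List.replicate (cnt.getD d.toNat 0 - (if d = 5 then 1 else 0))
                      (PySem.Int.toChars d)).flatten)).flatten) ++ ['5'])

-- ===== PRECONDITION & SPEC =====
-- Pre_: every character is a decimal digit — exactly the inputs where int(c), hence A, does not raise ValueError.
def Pre_ChiaHet (n : String) : Prop := n.toList.all (fun c => decide ('0' ≤ c ∧ c ≤ '9')) = true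
instance (n : String) : Decidable (Pre_ChiaHet n) := by unfold Pre_ChiaHet; infer_instance
def pvWitness_ChiaHet : String := "4050"

def Spec_ChiaHet (n : String) (out : String) : Prop := out = ChiaHet_alt n
instance (n : String) (out : String) : Decidable (Spec_ChiaHet n out) := by unfold Spec_ChiaHet; infer_instance

-- ===== CLAIM (what is proved, stated in full; the proofs are below) =====
def Claim_equal_ChiaHet : Prop := ∀ (n : String), Dom_ChiaHet n → Pre_ChiaHet n → Spec_ChiaHet n (ChiaHet n)

-- ===== LEMMAS AND PROOFS =====

-- digit value of a digit character
def pvDv (c : Char) : Int := (c.toNat : Int) - 48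

-- the digit characters
def pvDigit : Nat → Char
  | 0 => '0' | 1 => '1' | 2 => '2' | 3 => '3' | 4 => '4'
  | 5 => '5' | 6 => '6' | 7 => '7' | 8 => '8' | 9 => '9' | _ => ' '

-- digit counts of a string
def pvCf (cs : List Char) (k : Nat) : Nat := cs.count (pvDigit k)

-- the descending counting string: f k copies of digit k, for k = 9 … 0
def pvChunks (f : Nat → Nat) : List Char :=
  List.replicate (f 9) '9' ++ (List.replicate (f 8) '8' ++ (List.replicate (f 7) '7' ++
  (List.replicate (f 6) '6' ++ (List.replicate (f 5) '5' ++ (List.replicate (f 4) '4' ++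
  (List.replicate (f 3) '3' ++ (List.replicate (f 2) '2' ++ (List.replicate (f 1) '1' ++
  List.replicate (f 0) '0'))))))))

lemma pv_char_eq (c d : Char) (h : c.toNat = d.toNat) : c = d := by
  apply Char.ext; exact UInt32.toNat_inj.mp h

lemma pv_digit_cases (c : Char) (h : '0' ≤ c ∧ c ≤ '9') :
    ∃ j, j < 10 ∧ c = pvDigit j := by
  obtain ⟨h1, h2⟩ := h
  rw [Char.le_def, UInt32.le_iff_toNat_le] at h1 h2
  have e0 : ('0' : Char).val.toNat = 48 := by decide
  have e9 : ('9' : Char).val.toNat = 57 := by decide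
  have hb : ∃ j, j < 10 ∧ c.val.toNat = 48 + j := by
    refine ⟨c.val.toNat - 48, by omega, by omega⟩
  obtain ⟨j, hj, hv⟩ := hb
  refine ⟨j, hj, pv_char_eq _ _ ?_⟩
  interval_cases j <;> simpa [pvDigit] using hv

lemma pv_ofChars_digit : ∀ j, j < 10 → PySem.Int.ofChars? [pvDigit j] = some (j : Int) := by decide

lemma pv_dv_digit : ∀ j, j < 10 → pvDv (pvDigit j) = (j : Int) := by decide

lemma pv_flatten_rep {α : Type} (k : Nat) (a : α) :
    (List.replicate k [a]).flatten = List.replicate k a := by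
  induction k with
  | zero => simp
  | succ n ih => simp [List.replicate_succ, ih]

lemma pv_getD_set (cnt : List Nat) (j k v : Nat) (hj : j < cnt.length) :
    (cnt.set j v).getD k 0 = if j = k then v else cnt.getD k 0 := by
  rw [List.getD_eq_getElem?_getD, List.getD_eq_getElem?_getD, List.getElem?_set]
  by_cases hjk : j = k
  · subst hjk; rw [if_pos rfl, if_pos rfl, if_pos hj]; rfl
  · rw [if_neg hjk, if_neg hjk]

lemma pv_cf_cons (t : List Char) (j k : Nat) (hj : j < 10) (hk : k < 10) :
    pvCf (pvDigit j :: t) k = pvCf t k + (if j = k then 1 else 0) := by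
  interval_cases j <;> interval_cases k <;>
    simp [pvCf, pvDigit]

lemma pv_foldA (cs : List Char) : (∀ c ∈ cs, '0' ≤ c ∧ c ≤ '9') →
    ∀ s : Int, cs.foldl (fun acc c =>
      match acc, PySem.Int.ofChars? [c] with
      | some s, some v => some (s + v)
      | _, _ => none) (some s) = some (s + (cs.map pvDv).sum) := by
  induction cs with
  | nil => intro _ s; simp
  | cons c t ih =>
    intro h s
    obtain ⟨j, hj, rfl⟩ := pv_digit_cases c (h c (by simp))
    simp only [List.foldl_cons, pv_ofChars_digit j hj]
    rw [ih (fun d hd => h d (List.mem_cons_of_mem _ hd)) (s + j)]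
    simp [pv_dv_digit j hj, add_assoc]

lemma pv_foldB (cs : List Char) : (∀ c ∈ cs, '0' ≤ c ∧ c ≤ '9') →
    ∀ (s : Int) (cnt : List Nat), cnt.length = 10 →
    ∃ cnt', (cs.foldl (fun acc c =>
      match acc, PySem.Int.ofChars? [c] with
      | some (t, cnt), some d => some (t + d, cnt.set d.toNat (cnt.getD d.toNat 0 + 1))
      | _, _ => none) (some (s, cnt)) = some (s + (cs.map pvDv).sum, cnt')) ∧
      cnt'.length = 10 ∧ ∀ k, k < 10 → cnt'.getD k 0 = cnt.getD k 0 + pvCf cs k := by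
  induction cs with
  | nil =>
    intro _ s cnt hlen
    refine ⟨cnt, by simp, hlen, ?_⟩
    intro k hk
    simp [pvCf]
  | cons c t ih =>
    intro h s cnt hlen
    obtain ⟨j, hj, rfl⟩ := pv_digit_cases c (h c (by simp))
    obtain ⟨cnt', hfold, hlen', hcnt'⟩ :=
      ih (fun d hd => h d (List.mem_cons_of_mem _ hd)) (s + j)
        (cnt.set ((j : Int)).toNat (cnt.getD ((j : Int)).toNat 0 + 1))
        (by simpa using hlen)
    refine ⟨cnt', ?_, hlen', ?_⟩
    · simp only [List.foldl_cons, pv_ofChars_digit j hj]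
      rw [hfold]
      simp [pv_dv_digit j hj, add_assoc]
    · intro k hk
      rw [hcnt' k hk, pv_cf_cons t j k hj hk]
      rw [Int.toNat_natCast] at *
      rw [pv_getD_set cnt j k _ (by omega)]
      by_cases hjk : j = k
      · subst hjk
        rw [if_pos rfl, if_pos rfl]
        omega
      · simp [hjk]

lemma pv_perm (cs : List Char) (h : ∀ c ∈ cs, '0' ≤ c ∧ c ≤ '9') :
    (pvChunks (pvCf cs)).Perm cs := by
  rw [List.perm_iff_count]
  intro a
  by_cases hd : '0' ≤ a ∧ a ≤ '9'
  · obtain ⟨j, hj, rfl⟩ := pv_digit_cases a hd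
    interval_cases j <;>
      simp [pvChunks, pvCf, pvDigit, List.count_append, List.count_replicate]
  · have h1 : a ∉ cs := fun ha => hd (h a ha)
    have h2 : a ∉ pvChunks (pvCf cs) := by
      intro ha
      simp only [pvChunks, List.mem_append, List.mem_replicate] at ha
      rcases ha with ⟨-, rfl⟩|⟨-, rfl⟩|⟨-, rfl⟩|⟨-, rfl⟩|⟨-, rfl⟩|⟨-, rfl⟩|⟨-, rfl⟩|⟨-, rfl⟩|⟨-, rfl⟩|⟨-, rfl⟩ <;>
        exact hd (by decide)
    rw [List.count_eq_zero.mpr h2, List.count_eq_zero.mpr h1]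

lemma pv_pairwise_flat (ps : List (Nat × Char)) (hp : ps.Pairwise (fun p q => q.2 ≤ p.2)) :
    ((ps.map (fun p => List.replicate p.1 p.2)).flatten).Pairwise (fun a b : Char => b ≤ a) := by
  induction ps with
  | nil => simp
  | cons p t ih =>
    simp only [List.map_cons, List.flatten_cons]
    rw [List.pairwise_append]
    refine ⟨List.pairwise_replicate.mpr (Or.inr le_rfl), ih hp.tail, ?_⟩
    intro a ha b hb
    rw [List.mem_replicate] at ha
    rw [List.mem_flatten] at hb
    obtain ⟨l, hl, hbl⟩ := hb
    rw [List.mem_map] at hl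
    obtain ⟨q, hq, rfl⟩ := hl
    rw [List.mem_replicate] at hbl
    rw [ha.2, hbl.2]
    exact (List.pairwise_cons.mp hp).1 q hq

lemma pv_pairwise (f : Nat → Nat) :
    (pvChunks f).Pairwise (fun a b : Char => b ≤ a) := by
  have hp : ([(f 9,'9'),(f 8,'8'),(f 7,'7'),(f 6,'6'),(f 5,'5'),(f 4,'4'),(f 3,'3'),(f 2,'2'),(f 1,'1'),(f 0,'0')] :
      List (Nat × Char)).Pairwise (fun p q => q.2 ≤ p.2) := by
    have hch : (['9','8','7','6','5','4','3','2','1','0'] : List Char).Pairwise (fun a b => b ≤ a) := by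
      decide
    exact List.pairwise_map.mp
      (show List.Pairwise (fun a b : Char => b ≤ a)
        (List.map Prod.snd [((f 9 : Nat),'9'),(f 8,'8'),(f 7,'7'),(f 6,'6'),(f 5,'5'),(f 4,'4'),(f 3,'3'),(f 2,'2'),(f 1,'1'),(f 0,'0')]) from hch)
  have := pv_pairwise_flat _ hp
  simpa [pvChunks] using this

lemma pv_sorted (cs : List Char) (h : ∀ c ∈ cs, '0' ≤ c ∧ c ≤ '9') :
    PySem.List.sorted cs (fun c => c) true = pvChunks (pvCf cs) := by
  refine List.Perm.eq_of_pairwise (le := fun a b : Char => b ≤ a)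
    (fun a b _ _ h1 h2 => le_antisymm h2 h1)
    (PySem.List.sorted_pairwise_rev cs (fun c => c))
    (pv_pairwise _)
    ((PySem.List.sorted_perm cs (fun c => c) true).trans (pv_perm cs h).symm)

lemma pv_find_go (c : Char) (ys : List Char) :
    ∀ (xs : List Char) (k : Nat), c ∉ xs →
      PySem.Chars.find.go [c] (xs ++ c :: ys) k = ((k : Int) + xs.length) := by
  intro xs
  induction xs with
  | nil =>
    intro k _
    simp [PySem.Chars.find.go, List.isPrefixOf]
  | cons x t ih =>
    intro k hx
    have hcx : c ≠ x ∧ c ∉ t := by simpa [List.mem_cons, not_or] using hx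
    have hxc : ([c].isPrefixOf (x :: (t ++ c :: ys))) = false := by
      simp [List.isPrefixOf]
      intro h; exact absurd h hcx.1
    rw [List.cons_append]
    rw [show PySem.Chars.find.go [c] (x :: (t ++ c :: ys)) k
        = if [c].isPrefixOf (x :: (t ++ c :: ys)) then (k : Int) else PySem.Chars.find.go [c] (t ++ c :: ys) (k + 1) from rfl]
    rw [hxc]
    simp only [Bool.false_eq_true, if_false]
    rw [ih (k + 1) hcx.2]
    simp only [List.length_cons]
    push_cast
    ring

lemma pv_find (xs ys : List Char) (c : Char) (h : c ∉ xs) :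
    PySem.Chars.find (xs ++ c :: ys) [c] = (xs.length : Int) := by
  have := pv_find_go c ys xs 0 h
  simpa [PySem.Chars.find] using this

lemma pv_map_getD_take {α : Type} (xs : List α) (d : α) (m : Nat) (hm : m ≤ xs.length) :
    (List.range m).map (fun k => xs.getD k d) = xs.take m := by
  apply List.ext_getElem
  · simp [hm]
  · intro i h1 h2
    simp at h1
    simp [List.getD_eq_getElem?_getD, List.getElem?_eq_getElem (by omega : i < xs.length)]

lemma pv_map_getD_drop {α : Type} (xs : List α) (d : α) (m : Nat) (hm : m + 1 ≤ xs.length) :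
    (List.range (xs.length - 1 - m)).map (fun k => xs.getD (m + k + 1) d) = xs.drop (m + 1) := by
  apply List.ext_getElem
  · simp; omega
  · intro i h1 h2
    simp at h1
    simp [List.getD_eq_getElem?_getD, List.getElem?_eq_getElem (by omega : m + i + 1 < xs.length)]
    congr 1
    omega

lemma pv_pyRange_natCast (a b : Nat) :
    PySem.List.pyRange (a : Int) (b : Int) = (List.range (b - a)).map (fun k => ((a + k : Nat) : Int)) := by
  by_cases hab : a < b
  · simp only [PySem.List.pyRange]
    rw [if_neg (by norm_num : ¬(1 : Int) = 0)]
    simp only [if_pos (show (0 : Int) < 1 by norm_num), if_pos (show (a : Int) < (b : Int) by exact_mod_cast hab)]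
    have hc : (((b : Int) - a + 1 - 1) / 1).toNat = b - a := by omega
    rw [hc]
    apply List.map_congr_left
    intro k _
    push_cast
    ring
  · simp only [PySem.List.pyRange]
    rw [if_neg (by norm_num : ¬(1 : Int) = 0)]
    simp only [if_pos (show (0 : Int) < 1 by norm_num), if_neg (show ¬(a : Int) < (b : Int) by exact_mod_cast hab)]
    rw [show b - a = 0 from by omega]
    simp

lemma pv_isIn (c : Char) (cs : List Char) :
    PySem.Chars.isIn [c] cs = decide (c ∈ cs) := by
  by_cases h : c ∈ cs
  · simp [h, (PySem.Chars.isIn_iff_infix [c] cs).mpr ((List.singleton_infix_iff c cs).mpr h)]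
  · simp only [h, decide_false]
    rw [← Bool.not_eq_true]
    intro hT
    exact h ((List.singleton_infix_iff c cs).mp ((PySem.Chars.isIn_iff_infix [c] cs).mp hT))

-- A's two copy loops on st = H ++ '5' :: T, with '5' not in H, produce H ++ T
lemma pv_loops (H T : List Char) (hmem : '5' ∉ H) :
    (PySem.List.pyRange (PySem.Chars.find (H ++ '5' :: T) ['5']) (((H ++ '5' :: T).length : Int) - 1)).foldl
      (fun acc i => acc ++ [PySem.List.pyGetD (H ++ '5' :: T) (i + 1) ' '])
      ((PySem.List.pyRange 0 (PySem.Chars.find (H ++ '5' :: T) ['5'])).foldl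
        (fun acc i => acc ++ [PySem.List.pyGetD (H ++ '5' :: T) i ' ']) [])
    = H ++ T := by
  have hlen : (H ++ '5' :: T).length = H.length + T.length + 1 := by
    simp [List.length_append]
    omega
  rw [pv_find H T '5' hmem]
  rw [PySem.List.foldl_append_singleton_eq_map, PySem.List.foldl_append_singleton_eq_map, List.nil_append]
  rw [PySem.List.pyRange_zero_natCast, List.map_map]
  have hm1 : (List.range H.length).map ((fun i => PySem.List.pyGetD (H ++ '5' :: T) i ' ') ∘ (fun k : Nat => (k : Int)))
      = (List.range H.length).map (fun k => (H ++ '5' :: T).getD k ' ') := by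
    apply List.map_congr_left
    intro k _
    simp [PySem.List.pyGetD_natCast]
  rw [hm1, pv_map_getD_take _ _ _ (by omega), List.take_left]
  have hstop : ((H ++ '5' :: T).length : Int) - 1 = ((H.length + T.length : Nat) : Int) := by
    rw [hlen]; push_cast; ring
  rw [hstop, pv_pyRange_natCast, List.map_map]
  have hm2 : (List.range (H.length + T.length - H.length)).map
        ((fun i => PySem.List.pyGetD (H ++ '5' :: T) (i + 1) ' ') ∘ (fun k : Nat => ((H.length + k : Nat) : Int)))
      = (List.range ((H ++ '5' :: T).length - 1 - H.length)).map (fun k => (H ++ '5' :: T).getD (H.length + k + 1) ' ') := by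
    rw [show H.length + T.length - H.length = (H ++ '5' :: T).length - 1 - H.length from by omega]
    apply List.map_congr_left
    intro k _
    rw [Function.comp_apply,
      show ((H.length + k : Nat) : Int) + 1 = ((H.length + k + 1 : Nat) : Int) from by push_cast; ring,
      PySem.List.pyGetD_natCast]
  rw [hm2, pv_map_getD_drop _ _ _ (by omega)]
  have hdrop : (H ++ '5' :: T).drop (H.length + 1) = T := by
    rw [show H ++ '5' :: T = (H ++ ['5']) ++ T from by simp,
      show H.length + 1 = (H ++ ['5']).length from by simp,
      List.drop_left]
  rw [hdrop]

lemma pv_split (f : Nat → Nat) (h5 : 0 < f 5) :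
    pvChunks f = (((List.replicate (f 9) '9' ++ List.replicate (f 8) '8') ++ List.replicate (f 7) '7') ++ List.replicate (f 6) '6')
      ++ '5' :: (List.replicate (f 5 - 1) '5' ++ (List.replicate (f 4) '4' ++ (List.replicate (f 3) '3' ++
        (List.replicate (f 2) '2' ++ (List.replicate (f 1) '1' ++ List.replicate (f 0) '0'))))) := by
  conv_lhs => rw [pvChunks, show f 5 = (f 5 - 1) + 1 from by omega]
  simp [List.replicate_succ, List.append_assoc]

lemma pv_not_mem_H (f : Nat → Nat) :
    '5' ∉ (((List.replicate (f 9) '9' ++ List.replicate (f 8) '8') ++ List.replicate (f 7) '7') ++ List.replicate (f 6) '6') := by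
  simp [List.mem_append, List.mem_replicate]

lemma pv_rebuild (f : Nat → Nat) :
    ((((List.replicate (f 9) '9' ++ List.replicate (f 8) '8') ++ List.replicate (f 7) '7') ++ List.replicate (f 6) '6')
      ++ (List.replicate (f 5 - 1) '5' ++ (List.replicate (f 4) '4' ++ (List.replicate (f 3) '3' ++
        (List.replicate (f 2) '2' ++ (List.replicate (f 1) '1' ++ List.replicate (f 0) '0'))))))
    = pvChunks (fun k => f k - (if k = 5 then 1 else 0)) := by
  simp [pvChunks, List.append_assoc]

lemma pv_build0 (g : Nat → Nat) (cnt : List Nat) (h : ∀ k, k < 10 → cnt.getD k 0 = g k) :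
    ((PySem.List.pyRange 9 (-1) (-1)).map
      (fun d => (List.replicate (cnt.getD d.toNat 0) (PySem.Int.toChars d)).flatten)).flatten
    = pvChunks g := by
  rw [show PySem.List.pyRange 9 (-1) (-1) = [9, 8, 7, 6, 5, 4, 3, 2, 1, 0] from by decide]
  simp only [List.map_cons, List.map_nil, List.flatten_cons, List.flatten_nil, List.append_nil]
  simp only [show ((9 : Int)).toNat = 9 from rfl, show ((8 : Int)).toNat = 8 from rfl,
    show ((7 : Int)).toNat = 7 from rfl, show ((6 : Int)).toNat = 6 from rfl,
    show ((5 : Int)).toNat = 5 from rfl, show ((4 : Int)).toNat = 4 from rfl,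
    show ((3 : Int)).toNat = 3 from rfl, show ((2 : Int)).toNat = 2 from rfl,
    show ((1 : Int)).toNat = 1 from rfl, show ((0 : Int)).toNat = 0 from rfl]
  simp only [show PySem.Int.toChars 9 = ['9'] from by decide, show PySem.Int.toChars 8 = ['8'] from by decide,
    show PySem.Int.toChars 7 = ['7'] from by decide, show PySem.Int.toChars 6 = ['6'] from by decide,
    show PySem.Int.toChars 5 = ['5'] from by decide, show PySem.Int.toChars 4 = ['4'] from by decide,
    show PySem.Int.toChars 3 = ['3'] from by decide, show PySem.Int.toChars 2 = ['2'] from by decide,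
    show PySem.Int.toChars 1 = ['1'] from by decide, show PySem.Int.toChars 0 = ['0'] from by decide]
  simp only [pv_flatten_rep]
  rw [h 9 (by norm_num), h 8 (by norm_num), h 7 (by norm_num), h 6 (by norm_num),
    h 5 (by norm_num), h 4 (by norm_num), h 3 (by norm_num), h 2 (by norm_num),
    h 1 (by norm_num), h 0 (by norm_num)]
  simp [pvChunks]

lemma pv_build5 (g : Nat → Nat) (cnt : List Nat) (h : ∀ k, k < 10 → cnt.getD k 0 = g k) :
    ((PySem.List.pyRange 9 (-1) (-1)).map
      (fun d => (List.replicate (cnt.getD d.toNat 0 - (if d = 5 then 1 else 0)) (PySem.Int.toChars d)).flatten)).flatten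
    = pvChunks (fun k => g k - (if k = 5 then 1 else 0)) := by
  rw [show PySem.List.pyRange 9 (-1) (-1) = [9, 8, 7, 6, 5, 4, 3, 2, 1, 0] from by decide]
  simp only [List.map_cons, List.map_nil, List.flatten_cons, List.flatten_nil, List.append_nil]
  simp only [show ((9 : Int)).toNat = 9 from rfl, show ((8 : Int)).toNat = 8 from rfl,
    show ((7 : Int)).toNat = 7 from rfl, show ((6 : Int)).toNat = 6 from rfl,
    show ((5 : Int)).toNat = 5 from rfl, show ((4 : Int)).toNat = 4 from rfl,
    show ((3 : Int)).toNat = 3 from rfl, show ((2 : Int)).toNat = 2 from rfl,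
    show ((1 : Int)).toNat = 1 from rfl, show ((0 : Int)).toNat = 0 from rfl]
  simp only [show PySem.Int.toChars 9 = ['9'] from by decide, show PySem.Int.toChars 8 = ['8'] from by decide,
    show PySem.Int.toChars 7 = ['7'] from by decide, show PySem.Int.toChars 6 = ['6'] from by decide,
    show PySem.Int.toChars 5 = ['5'] from by decide, show PySem.Int.toChars 4 = ['4'] from by decide,
    show PySem.Int.toChars 3 = ['3'] from by decide, show PySem.Int.toChars 2 = ['2'] from by decide,
    show PySem.Int.toChars 1 = ['1'] from by decide, show PySem.Int.toChars 0 = ['0'] from by decide]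
  simp only [pv_flatten_rep]
  rw [h 9 (by norm_num), h 8 (by norm_num), h 7 (by norm_num), h 6 (by norm_num),
    h 5 (by norm_num), h 4 (by norm_num), h 3 (by norm_num), h 2 (by norm_num),
    h 1 (by norm_num), h 0 (by norm_num)]
  simp [pvChunks]

-- ===== VERDICT (by name: the statement is the Claim_ definition above) =====
theorem ChiaHet_spec : Claim_equal_ChiaHet := by
  unfold Claim_equal_ChiaHet
  intro n _ hpre
  unfold Spec_ChiaHet
  have hdig : ∀ c ∈ n.toList, '0' ≤ c ∧ c ≤ '9' := by
    intro c hc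
    have := (List.all_eq_true.mp hpre) c hc
    simpa using this
  have hA : TongChuSo n.toList = some ((n.toList.map pvDv).sum) := by
    unfold TongChuSo
    rw [pv_foldA n.toList hdig 0, zero_add]
  obtain ⟨cnt', hfold, hlen', hcnt0⟩ := pv_foldB n.toList hdig 0 (List.replicate 10 0) (by simp)
  have hcnt : ∀ k, k < 10 → cnt'.getD k 0 = pvCf n.toList k := by
    intro k hk
    rw [hcnt0 k hk,
      show (List.replicate 10 (0 : Nat)).getD k 0 = 0 from by interval_cases k <;> rfl,
      Nat.zero_add]
  simp only [ChiaHet, ChiaHet_alt, hA, hfold, zero_add]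
  by_cases hm : PySem.Int.mod ((n.toList.map pvDv).sum) 9 = 0
  · rw [if_pos hm, pv_isIn '5' n.toList, pv_isIn '0' n.toList]
    by_cases h0 : '0' ∈ n.toList
    · have hc0 : 0 < cnt'.getD 0 0 := by
        rw [hcnt 0 (by norm_num)]
        exact List.count_pos_iff.mpr h0
      simp only [decide_eq_true h0, Bool.or_true, Bool.not_true, Bool.and_false]
      rw [if_pos trivial]
      rw [if_neg (show ¬(false = true) from by simp)]
      rw [if_neg (show ¬(PySem.Int.mod ((n.toList.map pvDv).sum) 9 ≠ 0 ∨
            (cnt'.getD 0 0 = 0 ∧ cnt'.getD 5 0 = 0)) from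
            fun h => h.elim (fun h' => h' hm) (fun h' => by omega))]
      rw [if_pos hc0]
      rw [pv_sorted n.toList hdig, pv_build0 (pvCf n.toList) cnt' hcnt]
    · by_cases h5 : '5' ∈ n.toList
      · have hc5 : 0 < cnt'.getD 5 0 := by
          rw [hcnt 5 (by norm_num)]
          exact List.count_pos_iff.mpr h5
        have hc0 : cnt'.getD 0 0 = 0 := by
          rw [hcnt 0 (by norm_num)]
          exact List.count_eq_zero.mpr h0
        have hf5 : 0 < pvCf n.toList 5 := by
          rw [← hcnt 5 (by norm_num)]
          exact hc5
        simp only [decide_eq_true h5, decide_eq_false h0, Bool.or_false, Bool.not_false, Bool.and_self]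
        rw [if_pos trivial, if_pos trivial]
        rw [if_neg (show ¬(PySem.Int.mod ((n.toList.map pvDv).sum) 9 ≠ 0 ∨
              (cnt'.getD 0 0 = 0 ∧ cnt'.getD 5 0 = 0)) from
              fun h => h.elim (fun h' => h' hm) (fun h' => by omega))]
        rw [if_neg (show ¬(0 < cnt'.getD 0 0) from by omega)]
        rw [pv_build5 (pvCf n.toList) cnt' hcnt]
        rw [pv_sorted n.toList hdig, pv_split (pvCf n.toList) hf5,
          pv_loops _ _ (pv_not_mem_H (pvCf n.toList)), pv_rebuild]
      · have hc0 : cnt'.getD 0 0 = 0 := by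
          rw [hcnt 0 (by norm_num)]
          exact List.count_eq_zero.mpr h0
        have hc5 : cnt'.getD 5 0 = 0 := by
          rw [hcnt 5 (by norm_num)]
          exact List.count_eq_zero.mpr h5
        simp only [decide_eq_false h0, decide_eq_false h5, Bool.or_self]
        rw [if_neg (show ¬(false = true) from by simp)]
        rw [if_pos (Or.inr ⟨hc0, hc5⟩)]
  · rw [if_neg hm, if_pos (Or.inl hm)]
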